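-- pv_equiv track=rewrite | github.com/ikheetbas/Verhalen | rm/interface_file.py | get_fields_with_their_position
-- ===== SOURCE A (Python) =====
-- def get_fields_with_their_position(found_headers, defined_headers):
--     """
--     Returns the positions, as defined in the defined_headers, of the available headers
--     as found in the file. First position has index: 0
--     """
--     field_positions = dict()
--
--     for fieldname in defined_headers:
--         defined_header = defined_headers[fieldname]
--         if defined_header in found_headers:
--             position = found_headers.index(defined_header)
--             field_positions[fieldname] = position
--
--     return field_positions
-- ===== SOURCE B (Python) =====
-- def get_fields_with_their_position(found_headers, defined_headers):
--     """
--     Returns the positions, as defined in the defined_headers, of the available headers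
--     as found in the file. First position has index: 0
--     """
--     # Inverted index: header value -> list of fieldnames that define it.
--     wanted = {}
--     for fieldname, header in defined_headers.items():
--         wanted.setdefault(header, []).append(fieldname)
--
--     # One pass over found_headers from the back; earlier occurrences overwrite
--     # later ones, so each fieldname ends up with the FIRST index of its header.
--     positions = {}
--     for i, header in reversed(list(enumerate(found_headers))):
--         for fieldname in wanted.get(header, ()):
--             positions[fieldname] = i
--
--     # Assemble the result in defined_headers (fieldname) order.
--     return {fieldname: positions[fieldname]
--             for fieldname in defined_headers if fieldname in positions}
-- ===== Notes on version B (the rewrite author's own statement) =====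
-- stated objective: faster
-- what changed: B inverts defined_headers into a header-value->fieldnames multimap, then makes one reverse pass over found_headers assigning that index to every fieldname of the value (earlier occurrences overwrite later ones, so the first index wins), and finally assembles the result in fieldname order; A instead scans found_headers twice ('in' + '.index') per fieldname.
import Mathlib
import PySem

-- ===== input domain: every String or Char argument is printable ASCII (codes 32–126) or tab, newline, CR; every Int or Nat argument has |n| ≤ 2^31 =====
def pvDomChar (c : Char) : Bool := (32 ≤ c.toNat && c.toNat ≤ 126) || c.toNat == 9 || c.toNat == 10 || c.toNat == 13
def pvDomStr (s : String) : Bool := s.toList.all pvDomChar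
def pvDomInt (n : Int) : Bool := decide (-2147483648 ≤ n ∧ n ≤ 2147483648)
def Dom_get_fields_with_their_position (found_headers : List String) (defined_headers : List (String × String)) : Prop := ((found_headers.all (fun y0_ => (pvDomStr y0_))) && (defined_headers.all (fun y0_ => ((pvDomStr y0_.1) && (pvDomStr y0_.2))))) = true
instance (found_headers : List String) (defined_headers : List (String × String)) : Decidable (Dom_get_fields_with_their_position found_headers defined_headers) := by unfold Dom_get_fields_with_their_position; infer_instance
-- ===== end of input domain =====

-- B inverts defined_headers into a header→fieldnames multimap, then makes one reverse
-- pass over found_headers assigning indices (earlier occurrences overwrite later ones),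
-- and assembles the result in fieldname order; A scans found_headers per fieldname.

-- ===== PORT A =====
def get_fields_with_their_position (found_headers : List String) (defined_headers : List (String × String)) : List (String × Int) :=
  (defined_headers.foldl (fun acc p =>
      match List.lookup p.1 defined_headers with      -- defined_headers[fieldname]
      | some defined_header =>
        if found_headers.contains defined_header then
          match PySem.List.index? found_headers defined_header with
          | some position => acc.insert p.1 (position : Int)
          | none => acc
        else acc
      | none => acc)
    (PySem.Dict.empty : PySem.Dict String Int)).items

-- ===== PORT B =====
def get_fields_with_their_position_alt (found_headers : List String) (defined_headers : List (String × String)) : List (String × Int) :=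
  -- wanted.setdefault(header, []).append(fieldname)
  let wanted : PySem.Dict String (List String) :=
    defined_headers.foldl (fun d p => d.modify p.2 [] (fun l => l ++ [p.1])) PySem.Dict.empty
  -- for i, header in reversed(list(enumerate(found_headers))): for f in wanted.get(header, ()): positions[f] = i
  let positions : PySem.Dict String Int :=
    (PySem.List.enumerate found_headers 0).reverse.foldl
      (fun pos p => (wanted.getD p.2 []).foldl (fun pos f => pos.insert f p.1) pos)
      PySem.Dict.empty
  -- {fieldname: positions[fieldname] for fieldname in defined_headers if fieldname in positions}
  ((defined_headers.map Prod.fst).foldl (fun acc k =>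
      match positions.get? k with
      | some i => acc.insert k i
      | none => acc)
    (PySem.Dict.empty : PySem.Dict String Int)).items

-- ===== PRECONDITION & SPEC =====
-- Pre_ excludes association lists with a duplicated fieldname key: a Python dict
-- cannot contain duplicate keys, so these inputs never arise from the Python function.
def Pre_get_fields_with_their_position (found_headers : List String) (defined_headers : List (String × String)) : Prop :=
  (defined_headers.map Prod.fst).Nodup
instance (found_headers : List String) (defined_headers : List (String × String)) : Decidable (Pre_get_fields_with_their_position found_headers defined_headers) := by unfold Pre_get_fields_with_their_position; infer_instance

def pvWitness_get_fields_with_their_position : List String × (List (String × String)) :=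
  (["id", "name"], [("fid", "id"), ("fname", "name"), ("missing", "zz")])

def Spec_get_fields_with_their_position (found_headers : List String) (defined_headers : List (String × String)) (out : List (String × Int)) : Prop := out = get_fields_with_their_position_alt found_headers defined_headers
instance (found_headers : List String) (defined_headers : List (String × String)) (out : List (String × Int)) : Decidable (Spec_get_fields_with_their_position found_headers defined_headers out) := by unfold Spec_get_fields_with_their_position; infer_instance

-- ===== CLAIM (what is proved, stated in full; the proofs are below) =====
def Claim_equal_get_fields_with_their_position : Prop := ∀ (found_headers : List String) (defined_headers : List (String × String)), Dom_get_fields_with_their_position found_headers defined_headers → Pre_get_fields_with_their_position found_headers defined_headers → Spec_get_fields_with_their_position found_headers defined_headers (get_fields_with_their_position found_headers defined_headers)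

-- ===== LEMMAS AND PROOFS =====

-- The inverted index: its bucket for h holds exactly the fieldnames mapped to h, in order.
theorem wanted_getD (defs : List (String × String)) (h : String) :
    (defs.foldl (fun d p => d.modify p.2 [] (fun l => l ++ [p.1])) PySem.Dict.empty).getD h []
      = (defs.filter (fun p => p.2 == h)).map Prod.fst := by
  have hm : defs.foldl (fun d p => d.modify p.2 [] (fun l => l ++ [p.1])) PySem.Dict.empty
      = (defs.map Prod.swap).foldl (fun d p => d.modify p.1 [] (fun l => l ++ [p.2])) PySem.Dict.empty := by
    rw [List.foldl_map]; rfl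
  rw [hm, PySem.Dict.getD_foldl_modify_append]
  simp [List.filter_map, List.map_map, Function.comp_def, Prod.swap]

-- Writing one index i for every name of a list: lookup afterwards.
theorem foldl_insert_get? (lst : List String) (i : Int) (pos : PySem.Dict String Int) (k : String) :
    (lst.foldl (fun pos f => pos.insert f i) pos).get? k
      = if k ∈ lst then some i else pos.get? k := by
  induction lst generalizing pos with
  | nil => simp
  | cons a lst ih =>
    rw [List.foldl_cons, ih]
    by_cases hk : k ∈ lst
    · simp [hk]
    · by_cases hka : k = a
      · subst hka; simp [hk, PySem.Dict.get?_insert_self]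
      · simp [hk, hka, PySem.Dict.get?_insert, List.mem_cons]

-- The reverse pass, read as a foldr: k's final value is the index paired with the
-- FIRST element of l whose header is v (k's own header, by hw).
theorem foldr_pos_get? (w : PySem.Dict String (List String)) (k v : String)
    (hw : ∀ h, k ∈ w.getD h [] ↔ h = v)
    (l : List (Int × String)) (pos0 : PySem.Dict String Int) :
    (l.foldr (fun p pos => (w.getD p.2 []).foldl (fun pos f => pos.insert f p.1) pos) pos0).get? k
      = match l.find? (fun p => p.2 == v) with
        | some p => some p.1
        | none => pos0.get? k := by
  induction l with
  | nil => simp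
  | cons p l ih =>
    rw [List.foldr_cons, foldl_insert_get?, ih, List.find?_cons]
    by_cases hpv : p.2 = v
    · simp [hw, hpv]
    · have hb : (p.2 == v) = false := beq_eq_false_iff_ne.mpr hpv
      simp [hw, hpv, hb]

-- find? on an enumeration is index? of the value.
theorem find?_enumerate (xs : List String) (s : Int) (v : String) :
    (PySem.List.enumerate xs s).find? (fun p => p.2 == v)
      = (PySem.List.index? xs v).map (fun n : Nat => (s + (n : Int), v)) := by
  induction xs generalizing s with
  | nil => simp [PySem.List.enumerate_nil]
  | cons x xs ih =>
    rw [PySem.List.enumerate_cons, List.find?_cons]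
    by_cases hxv : x = v
    · subst hxv
      rw [PySem.List.index?_cons_self]
      simp
    · have hb : ((s, x).2 == v) = false := by simpa using hxv
      simp only [hb, PySem.List.index?_cons_of_ne xs hxv, ih, Option.map_map]
      congr 1
      funext n
      simp only [Function.comp_apply]
      congr 1
      push_cast
      ring

-- In an association list with distinct keys, looking up a pair's key returns its value.
theorem lookup_self_of_nodup {l : List (String × String)} (hnd : (l.map Prod.fst).Nodup)
    {k v : String} (hmem : (k, v) ∈ l) : List.lookup k l = some v := by
  induction l with
  | nil => cases hmem
  | cons p rest ih =>
    simp only [List.map_cons, List.nodup_cons] at hnd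
    rcases List.mem_cons.mp hmem with heq | hm
    · rw [← heq]; simp [List.lookup]
    · have hk : (k == p.1) = false := by
        refine beq_eq_false_iff_ne.mpr ?_
        intro e
        exact hnd.1 (e ▸ List.mem_map.mpr ⟨(k, v), hm, rfl⟩)
      simp [List.lookup, hk, ih hnd.2 hm]

-- With distinct fieldnames, k sits in exactly the bucket of its own header value.
theorem mem_bucket_iff {defs : List (String × String)} (hnd : (defs.map Prod.fst).Nodup)
    {k v : String} (hmem : (k, v) ∈ defs) (h : String) :
    k ∈ (defs.filter (fun p => p.2 == h)).map Prod.fst ↔ h = v := by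
  constructor
  · intro hk
    obtain ⟨p, hpf, hpk⟩ := List.mem_map.mp hk
    obtain ⟨hpd, hph⟩ := List.mem_filter.mp hpf
    have hph' : p.2 = h := by simpa using hph
    -- p and (k, v) share the key k in a Nodup-keyed list, hence the same value
    have hkv : List.lookup k defs = some v := lookup_self_of_nodup hnd hmem
    have hpe : p = (k, p.2) := by rw [← hpk]
    have hp2 : List.lookup k defs = some p.2 := by
      rw [hpe] at hpd
      exact lookup_self_of_nodup hnd hpd
    have hv2 : v = p.2 := Option.some.inj (hkv.symm.trans hp2)
    exact (hv2 ▸ hph').symm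
  · intro hv
    exact List.mem_map.mpr ⟨(k, v), List.mem_filter.mpr ⟨hmem, by simp [hv]⟩, rfl⟩

-- ===== VERDICT (by name: the statement is the Claim_ definition above) =====
theorem get_fields_with_their_position_spec : Claim_equal_get_fields_with_their_position := by
  intro found_headers defined_headers _ hpre
  unfold Spec_get_fields_with_their_position
  unfold get_fields_with_their_position get_fields_with_their_position_alt
  simp only [List.foldl_map]
  congr 1
  apply PySem.List.foldl_congr_mem
  intro acc p hp
  obtain ⟨k, v⟩ := p
  rw [lookup_self_of_nodup hpre hp]
  have hw : ∀ h, k ∈ ((defined_headers.foldl (fun d p => d.modify p.2 [] (fun l => l ++ [p.1])) PySem.Dict.empty).getD h []) ↔ h = v := by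
    intro h
    rw [wanted_getD]
    exact mem_bucket_iff hpre hp h
  rw [List.foldl_reverse, foldr_pos_get? _ k v hw, find?_enumerate]
  cases hidx : PySem.List.index? found_headers v with
  | none =>
    have hnm : v ∉ found_headers := (PySem.List.index?_eq_none_iff _ _).mp hidx
    have hidx' : List.idxOf? v found_headers = none := by
      rw [← PySem.List.index?_eq_idxOf?]; exact hidx
    simp [hnm]
  | some n =>
    have hs : (PySem.List.index? found_headers v).isSome = true := by rw [hidx]; rfl
    have hv : v ∈ found_headers := (PySem.List.index?_isSome_iff found_headers v).mp hs
    have hidx' : List.idxOf? v found_headers = some n := by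
      rw [← PySem.List.index?_eq_idxOf?]; exact hidx
    simp [hv, hidx']
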